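-- pv_equiv track=rewrite | github.com/Den4200/advent-of-code | 2022/08/solution.py | get_visible_path
-- ===== SOURCE A (Python) =====
-- def get_visible_path(height_map, reverse=False):
--     positions = set()
--
--     for y, row in enumerate(height_map[1:-1], start=1):
--         highest = row[0]
--
--         for x, val in enumerate(row[1:], start=1):
--             if val > highest:
--                 if reverse:
--                     positions.add((y, x))
--                 else:
--                     positions.add((x, y))
--
--                 highest = val
--
--     for y, row in enumerate(height_map[1:-1], start=1):
--         highest = row[-1]
--
--         for x, val in enumerate(reversed(row[:-1]), start=1):
--             if val > highest:
--                 if reverse: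
--                     positions.add((y, len(row) - x - 1))
--                 else:
--                     positions.add((len(row) - x - 1, y))
--
--                 highest = val
--
--     return positions
-- ===== SOURCE B (Python) =====
-- def get_visible_path(height_map, reverse=False):
--     positions = set()
--     interior = height_map[1:-1]
--
--     for y, row in enumerate(interior, start=1):
--         for j in range(1, len(row)):
--             if row[j] > max(row[:j]):
--                 positions.add((y, j) if reverse else (j, y))
--
--     for y, row in enumerate(interior, start=1):
--         for j in range(len(row) - 2, -1, -1):
--             if row[j] > max(row[j + 1:]):
--                 positions.add((y, j) if reverse else (j, y))
--
--     return positions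
-- ===== Notes on version B (the rewrite author's own statement) =====
-- stated objective: simpler
-- what changed: Replaces A's fused running-max state machine (accumulator `highest` updated inside each scan, plus a reversed iteration with len(row)-x-1 mirror arithmetic for the right pass) by the direct definition: index loops that mark position j visible iff row[j] is strictly greater than max() of the slice before (after) it, the right pass simply counting j down.
import Mathlib
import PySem

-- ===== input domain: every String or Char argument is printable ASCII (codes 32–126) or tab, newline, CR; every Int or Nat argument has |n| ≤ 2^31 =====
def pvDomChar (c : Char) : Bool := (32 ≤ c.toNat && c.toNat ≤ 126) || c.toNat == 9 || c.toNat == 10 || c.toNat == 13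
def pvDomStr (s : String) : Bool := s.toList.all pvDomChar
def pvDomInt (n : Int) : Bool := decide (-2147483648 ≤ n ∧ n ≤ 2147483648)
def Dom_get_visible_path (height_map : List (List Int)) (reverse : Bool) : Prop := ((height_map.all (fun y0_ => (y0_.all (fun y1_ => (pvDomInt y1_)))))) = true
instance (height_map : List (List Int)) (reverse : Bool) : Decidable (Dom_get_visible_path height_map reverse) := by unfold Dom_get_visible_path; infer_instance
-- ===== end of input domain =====

-- B replaces A's fused running-max state machine (accumulator `highest`, reversed iteration,
-- len(row)-x-1 mirror arithmetic) by the direct definition: j is visible iff row[j] > max of the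
-- slice before (after) it — simpler, not faster (A is O(R*C), B is O(R*C^2)).

-- ===== PORT A =====
-- inner loop shared verbatim by A's two passes: running max `highest`, counter x, emit mk x
def pvAInner (pos : PySem.Set (Int × Int)) (highest : Int) (x : Int) (vs : List Int)
    (mk : Int → Int × Int) : PySem.Set (Int × Int) :=
  match vs with
  | [] => pos
  | v :: t =>
      if v > highest then pvAInner (PySem.Set.add pos (mk x)) v (x + 1) t mk
      else pvAInner pos highest (x + 1) t mk

def pvALoop1 (pos : PySem.Set (Int × Int)) (y : Int) (rows : List (List Int))
    (reverse : Bool) : PySem.Set (Int × Int) :=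
  match rows with
  | [] => pos
  | row :: rest =>
      let pos' := match row with
        | [] => pos  -- `highest = row[0]` raises IndexError here; excluded by Pre_
        | h :: t => pvAInner pos h 1 t (fun x => if reverse then (y, x) else (x, y))
      pvALoop1 pos' (y + 1) rest reverse

def pvALoop2 (pos : PySem.Set (Int × Int)) (y : Int) (rows : List (List Int))
    (reverse : Bool) : PySem.Set (Int × Int) :=
  match rows with
  | [] => pos
  | row :: rest =>
      let n : Int := (row.length : Int)
      let pos' := match PySem.List.pyGet? row (-1) with
        | none => pos  -- `highest = row[-1]` raises IndexError here; excluded by Pre_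
        | some h =>
            pvAInner pos h 1 ((PySem.List.slice row none (some (-1))).reverse)
              (fun x => if reverse then (y, n - x - 1) else (n - x - 1, y))
      pvALoop2 pos' (y + 1) rest reverse

def get_visible_path (height_map : List (List Int)) (reverse : Bool) : List (Int × Int) :=
  let interior := PySem.List.slice height_map (some 1) (some (-1))
  pvALoop2 (pvALoop1 PySem.Set.empty 1 interior reverse) 1 interior reverse

-- ===== PORT B =====
-- max(l) for the nonempty slices B takes it of
def pvBMax (l : List Int) : Int := (PySem.List.max? l (fun v => v)).getD 0

def pvBLoopL (pos : PySem.Set (Int × Int)) (y : Int) (rows : List (List Int))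
    (reverse : Bool) : PySem.Set (Int × Int) :=
  match rows with
  | [] => pos
  | row :: rest =>
      let pos' := (PySem.List.pyRange 1 (row.length : Int) 1).foldl (fun s j =>
          if PySem.List.pyGetD row j 0 > pvBMax (PySem.List.slice row none (some j)) then
            PySem.Set.add s (if reverse then (y, j) else (j, y))
          else s) pos
      pvBLoopL pos' (y + 1) rest reverse

def pvBLoopR (pos : PySem.Set (Int × Int)) (y : Int) (rows : List (List Int))
    (reverse : Bool) : PySem.Set (Int × Int) :=
  match rows with
  | [] => pos
  | row :: rest =>
      let pos' := (PySem.List.pyRange ((row.length : Int) - 2) (-1) (-1)).foldl (fun s j =>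
          if PySem.List.pyGetD row j 0 > pvBMax (PySem.List.slice row (some (j + 1)) none) then
            PySem.Set.add s (if reverse then (y, j) else (j, y))
          else s) pos
      pvBLoopR pos' (y + 1) rest reverse

def get_visible_path_alt (height_map : List (List Int)) (reverse : Bool) : List (Int × Int) :=
  let interior := PySem.List.slice height_map (some 1) (some (-1))
  pvBLoopR (pvBLoopL PySem.Set.empty 1 interior reverse) 1 interior reverse

-- ===== PRECONDITION & SPEC =====
-- Pre_ excludes exactly the inputs where A raises IndexError: an empty interior row.
def Pre_get_visible_path (height_map : List (List Int)) (reverse : Bool) : Prop :=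
  ∀ row ∈ PySem.List.slice height_map (some 1) (some (-1)), row ≠ []
instance (height_map : List (List Int)) (reverse : Bool) : Decidable (Pre_get_visible_path height_map reverse) := by unfold Pre_get_visible_path; infer_instance

def pvWitness_get_visible_path : List (List Int) × Bool := ([[3, 3, 3], [2, 5, 2], [3, 3, 3]], false)

def Spec_get_visible_path (height_map : List (List Int)) (reverse : Bool) (out : List (Int × Int)) : Prop := out = get_visible_path_alt height_map reverse
instance (height_map : List (List Int)) (reverse : Bool) (out : List (Int × Int)) : Decidable (Spec_get_visible_path height_map reverse out) := by unfold Spec_get_visible_path; infer_instance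

-- ===== CLAIM (what is proved, stated in full; the proofs are below) =====
def Claim_equal_get_visible_path : Prop := ∀ (height_map : List (List Int)) (reverse : Bool), Dom_get_visible_path height_map reverse → Pre_get_visible_path height_map reverse → Spec_get_visible_path height_map reverse (get_visible_path height_map reverse)

-- ===== LEMMAS AND PROOFS =====

-- the visibility test both per-row scans boil down to, as a predicate on the Nat index
def pvCond (row : List Int) (j : Nat) : Bool :=
  decide (row.getD j 0 > pvBMax (row.take j))

theorem pvBMax_append_singleton (pre : List Int) (v : Int) (h : pre ≠ []) :
    pvBMax (pre ++ [v]) = max (pvBMax pre) v := by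
  cases pre with
  | nil => simp at h
  | cons p ps => simp [pvBMax, PySem.List.max?_id_cons, List.foldl_append]

theorem pvBMax_spec (l : List Int) (h : l ≠ []) : pvBMax l ∈ l ∧ ∀ x ∈ l, x ≤ pvBMax l := by
  cases e : PySem.List.max? l (fun v => v) with
  | none => exact absurd ((PySem.List.max?_eq_none_iff _ _).mp e) h
  | some m =>
      refine ⟨?_, ?_⟩
      · simpa [pvBMax, e] using PySem.List.max?_mem e
      · intro x hx; simpa [pvBMax, e] using PySem.List.max?_isMax e x hx

theorem pvBMax_reverse (l : List Int) : pvBMax l.reverse = pvBMax l := by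
  cases l with
  | nil => rfl
  | cons p ps =>
      have h1 := pvBMax_spec (p :: ps) (by simp)
      have h2 := pvBMax_spec (p :: ps).reverse (by simp)
      exact le_antisymm (h1.2 _ (List.mem_reverse.mp h2.1)) (h2.2 _ (List.mem_reverse.mpr h1.1))

theorem pvAInner_eq (mk : Int → Int × Int) (vs : List Int) : ∀ (pre : List Int)
    (pos : PySem.Set (Int × Int)), pre ≠ [] →
    pvAInner pos (pvBMax pre) (pre.length : Int) vs mk
      = ((List.range' pre.length vs.length).filter (fun j => pvCond (pre ++ vs) j)).foldl
          (fun s (j : Nat) => PySem.Set.add s (mk (j : Int))) pos := by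
  induction vs with
  | nil => intro pre pos h; simp [pvAInner]
  | cons v t ih =>
      intro pre pos h
      have hc : pvCond (pre ++ v :: t) pre.length = decide (v > pvBMax pre) := by
        simp [pvCond, List.getD]
      have happ : (pre ++ [v]) ++ t = pre ++ v :: t := by simp
      have hlen : ((pre ++ [v]).length : Int) = (pre.length : Int) + 1 := by simp
      simp only [List.length_cons, List.range'_succ]
      by_cases hv : v > pvBMax pre
      · have hmax : pvBMax (pre ++ [v]) = v := by
          rw [pvBMax_append_singleton pre v h]; exact max_eq_right (le_of_lt hv)
        have := ih (pre ++ [v]) (PySem.Set.add pos (mk (pre.length : Int))) (by simp)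
        rw [hmax, hlen, happ] at this
        simp only [List.length_append, List.length_cons, List.length_nil] at this
        simp [pvAInner, hv, hc, this]
      · have hmax : pvBMax (pre ++ [v]) = pvBMax pre := by
          rw [pvBMax_append_singleton pre v h]; exact max_eq_left (not_lt.mp hv)
        have := ih (pre ++ [v]) pos (by simp)
        rw [hmax, hlen, happ] at this
        simp only [List.length_append, List.length_cons, List.length_nil] at this
        simp [pvAInner, hv, hc, this]

theorem pvReverse_eq (row : List Int) (h : row ≠ []) :
    row.reverse = row.getLast h :: row.dropLast.reverse := by
  conv_lhs => rw [← List.dropLast_concat_getLast h]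
  simp

theorem pvRowL (hd : Int) (t : List Int) (mk : Int → Int × Int)
    (pos : PySem.Set (Int × Int)) :
    pvAInner pos hd 1 t mk
      = (PySem.List.pyRange 1 (((hd :: t).length : Int)) 1).foldl (fun s j =>
          if PySem.List.pyGetD (hd :: t) j 0 > pvBMax (PySem.List.slice (hd :: t) none (some j)) then
            PySem.Set.add s (mk j) else s) pos := by
  have h0 : pvBMax [hd] = hd := by simp [pvBMax, PySem.List.max?_id_cons]
  have hA := pvAInner_eq mk t [hd] pos (by simp)
  rw [h0] at hA
  norm_num at hA
  rw [hA, ← PySem.List.foldl_if_eq_foldl_filter]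
  rw [PySem.List.pyRange_one]
  have h1 : (((hd :: t).length : Int) - 1).toNat = t.length := by simp
  rw [h1, List.range'_eq_map_range, List.foldl_map, List.foldl_map]
  apply PySem.List.foldl_congr_mem
  intro acc k hk
  have hcast : (1 : Int) + (k : Int) = ((1 + k : Nat) : Int) := by push_cast; ring
  rw [hcast]
  simp only [pvCond, PySem.List.pyGetD_natCast, PySem.List.slice_to_natCast, List.getD,
    decide_eq_true_eq, gt_iff_lt]

theorem pvRowR (row : List Int) (h : row ≠ []) (mkB : Int → Int × Int)
    (pos : PySem.Set (Int × Int)) :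
    pvAInner pos (row.getLast h) 1 row.dropLast.reverse
        (fun x => mkB ((row.length : Int) - x - 1))
      = (PySem.List.pyRange ((row.length : Int) - 2) (-1) (-1)).foldl (fun s j =>
          if PySem.List.pyGetD row j 0 > pvBMax (PySem.List.slice row (some (j + 1)) none) then
            PySem.Set.add s (mkB j) else s) pos := by
  have hA := pvAInner_eq (fun x => mkB ((row.length : Int) - x - 1)) row.dropLast.reverse
      [row.getLast h] pos (by simp)
  have h0 : pvBMax [row.getLast h] = row.getLast h := by simp [pvBMax, PySem.List.max?_id_cons]
  rw [h0] at hA; norm_num at hA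
  rw [← pvReverse_eq row h] at hA
  rw [hA, ← PySem.List.foldl_if_eq_foldl_filter]
  rw [PySem.List.pyRange_neg_one]
  have h1 : (((row.length : Int) - 2) - (-1)).toNat = row.length - 1 := by omega
  rw [h1, List.range'_eq_map_range, List.foldl_map, List.foldl_map]
  apply PySem.List.foldl_congr_mem
  intro acc k hk
  rw [List.mem_range] at hk
  -- k < row.length - 1; set m := row.length - 2 - k
  have hn2 : 2 ≤ row.length := by omega
  have hm : ((row.length : Int) - 2) - (k : Int) = ((row.length - 2 - k : Nat) : Int) := by omega
  have harg : ((row.length : Int)) - ((1 + k : Nat) : Int) - 1 = ((row.length - 2 - k : Nat) : Int) := by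
    push_cast; omega
  rw [hm, harg]
  have hsl : ((row.length - 2 - k : Nat) : Int) + 1 = ((row.length - 1 - k : Nat) : Int) := by omega
  rw [hsl]
  simp only [pvCond, PySem.List.pyGetD_natCast, PySem.List.slice_from_natCast, List.getD,
    decide_eq_true_eq, gt_iff_lt]
  -- now relate reverse lookups
  have hg : row.reverse[(1 + k : Nat)]? = row[(row.length - 2 - k : Nat)]? := by
    rw [List.getElem?_reverse (by omega)]
    congr 1; omega
  have ht : row.reverse.take (1 + k) = (row.drop (row.length - 1 - k)).reverse := by
    have e : row.length - (1 + k) = row.length - 1 - k := by omega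
    rw [List.take_reverse, e]
  rw [hg, ht, pvBMax_reverse]

theorem pvLoopL_eq : ∀ (rows : List (List Int)) (pos : PySem.Set (Int × Int)) (y : Int)
    (rev : Bool), (∀ r ∈ rows, r ≠ []) → pvALoop1 pos y rows rev = pvBLoopL pos y rows rev := by
  intro rows
  induction rows with
  | nil => intro pos y rev _; rfl
  | cons row rest ih =>
      intro pos y rev hne
      cases row with
      | nil => exact absurd rfl (hne [] (by simp))
      | cons hd t =>
          simp only [pvALoop1, pvBLoopL]
          rw [pvRowL hd t (fun j => if rev then (y, j) else (j, y)) pos]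
          exact ih _ _ _ (fun r hr => hne r (by simp [hr]))

theorem pvLoopR_eq : ∀ (rows : List (List Int)) (pos : PySem.Set (Int × Int)) (y : Int)
    (rev : Bool), (∀ r ∈ rows, r ≠ []) → pvALoop2 pos y rows rev = pvBLoopR pos y rows rev := by
  intro rows
  induction rows with
  | nil => intro pos y rev _; rfl
  | cons row rest ih =>
      intro pos y rev hne
      have h : row ≠ [] := hne row (by simp)
      have hg : PySem.List.pyGet? row (-1) = some (row.getLast h) := by
        rw [PySem.List.pyGet?_neg_one, List.getLast?_eq_some_getLast h]
      simp only [pvALoop2, pvBLoopR, hg, PySem.List.slice_to_neg_one]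
      rw [pvRowR row h (fun j => if rev then (y, j) else (j, y)) pos]
      exact ih _ _ _ (fun r hr => hne r (by simp [hr]))

-- ===== VERDICT (by name: the statement is the Claim_ definition above) =====
theorem get_visible_path_spec : Claim_equal_get_visible_path := by
  intro hm rev _ hpre
  unfold Spec_get_visible_path Pre_get_visible_path at *
  unfold get_visible_path get_visible_path_alt
  show pvALoop2 (pvALoop1 PySem.Set.empty 1 _ rev) 1 _ rev
      = pvBLoopR (pvBLoopL PySem.Set.empty 1 _ rev) 1 _ rev
  rw [pvLoopL_eq _ _ _ _ hpre, pvLoopR_eq _ _ _ _ hpre]
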